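-- pv_equiv track=rewrite | github.com/xscchoux/Leetcode-Submissions | 2731-Movement of Robots.py | sumDistance
-- ===== SOURCE A (Python) =====
-- from typing import List
--
-- def sumDistance(nums: List[int], s: str, d: int) -> int:
--     kMod = 10**9+7
--     for i in range(len(nums)):
--         if s[i] == "R":
--             nums[i] += d
--         else:
--             nums[i] -= d
--
--     nums.sort()
--
--     prev = 0 # sum of distances from all previous points to current point
--     res = 0
--
--     for i in range(1, len(nums)):
--         prev = (prev + i*(nums[i] - nums[i-1]))%kMod
--         res = (res + prev)%kMod
--
--     return res
-- ===== SOURCE B (Python) =====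
-- def sumDistance(nums, s, d):
--     kMod = 10**9 + 7
--     for i in range(len(nums)):
--         if s[i] == "R":
--             nums[i] += d
--         else:
--             nums[i] -= d
--     nums.sort()
--     n = len(nums)
--     res = 0
--     for i, x in enumerate(nums):
--         res = (res + x * (2 * i - n + 1)) % kMod
--     return res
-- ===== Notes on version B (the rewrite author's own statement) =====
-- stated objective: simpler
-- what changed: Replaced the incremental prev/prefix-gap accumulator over consecutive differences with a single pass that adds each sorted element's closed-form contribution x*(2*i-n+1) mod 1e9+7.
import Mathlib
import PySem

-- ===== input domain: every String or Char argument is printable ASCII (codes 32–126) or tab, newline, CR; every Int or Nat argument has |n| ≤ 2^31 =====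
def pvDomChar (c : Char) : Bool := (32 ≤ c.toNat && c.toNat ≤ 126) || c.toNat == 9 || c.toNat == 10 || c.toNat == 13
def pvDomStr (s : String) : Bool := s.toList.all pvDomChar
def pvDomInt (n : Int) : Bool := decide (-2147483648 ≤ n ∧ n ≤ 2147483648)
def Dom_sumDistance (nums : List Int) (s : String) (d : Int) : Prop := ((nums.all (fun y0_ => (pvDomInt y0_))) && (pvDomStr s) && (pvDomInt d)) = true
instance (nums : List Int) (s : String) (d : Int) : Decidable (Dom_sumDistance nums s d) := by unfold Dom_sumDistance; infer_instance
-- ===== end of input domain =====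

-- B replaces A's incremental prefix-gap accumulator with each element's closed-form
-- coefficient x*(2*i-n+1); simpler, same O(n log n). Both Pythons mutate nums in place
-- identically (move then sort); the equivalence proved here is about the return value.


-- ===== PORT A =====
-- shared by both ports: both Pythons move the robots and sort with identical code
-- (for i in range(len(nums)): nums[i] ± d depending on s[i] == "R"; nums.sort())
def pvMoved (nums : List Int) (s : String) (d : Int) : List Int :=
  PySem.List.sorted
    ((PySem.List.enumerate nums).map
      (fun p => if PySem.Str.pyGet? s p.1 = some 'R' then p.2 + d else p.2 - d))
    (fun x => x) false

def sumDistance (nums : List Int) (s : String) (d : Int) : Int :=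
  let kMod : Int := 10 ^ 9 + 7
  let arr := pvMoved nums s d
  -- for i in range(1, len(nums)): prev = (prev + i*(nums[i]-nums[i-1]))%kMod; res = (res+prev)%kMod
  (((PySem.List.pyRange 1 (arr.length : Int) 1).foldl
    (fun (st : Int × Int) i =>
      let prev := PySem.Int.mod
        (st.1 + i * (PySem.List.pyGetD arr i 0 - PySem.List.pyGetD arr (i - 1) 0)) kMod
      (prev, PySem.Int.mod (st.2 + prev) kMod)) ((0 : Int), (0 : Int)))).2

-- ===== PORT B =====
def sumDistance_alt (nums : List Int) (s : String) (d : Int) : Int :=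
  let kMod : Int := 10 ^ 9 + 7
  let arr := pvMoved nums s d
  let n : Int := arr.length
  -- for i, x in enumerate(nums): res = (res + x*(2*i - n + 1)) % kMod
  (PySem.List.enumerate arr).foldl
    (fun res p => PySem.Int.mod (res + p.2 * (2 * p.1 - n + 1)) kMod) 0

-- ===== PRECONDITION & SPEC =====
-- Python A (and B) raises IndexError reading s[i] when len(s) < len(nums); exactly those inputs are excluded.
def Pre_sumDistance (nums : List Int) (s : String) (d : Int) : Prop :=
  nums.length ≤ s.toList.length
instance (nums : List Int) (s : String) (d : Int) : Decidable (Pre_sumDistance nums s d) := by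
  unfold Pre_sumDistance; infer_instance

def pvWitness_sumDistance : List Int × String × Int := ([3, -1, 0], "RLR", 2)

def Spec_sumDistance (nums : List Int) (s : String) (d : Int) (out : Int) : Prop := out = sumDistance_alt nums s d
instance (nums : List Int) (s : String) (d : Int) (out : Int) : Decidable (Spec_sumDistance nums s d out) := by unfold Spec_sumDistance; infer_instance

-- ===== CLAIM (what is proved, stated in full; the proofs are below) =====
def Claim_equal_sumDistance : Prop := ∀ (nums : List Int) (s : String) (d : Int), Dom_sumDistance nums s d → Pre_sumDistance nums s d → Spec_sumDistance nums s d (sumDistance nums s d)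

-- ===== LEMMAS AND PROOFS =====

-- the true (un-modded) running quantities of A's loop, for f k = arr[k]:
-- pvT m = Σ_{i=1..m} i*(f i - f (i-1)),  pvU m = Σ_{j=1..m} pvT j
def pvT (f : Nat → Int) : Nat → Int
  | 0 => 0
  | m + 1 => pvT f m + ((m : Int) + 1) * (f (m + 1) - f m)

def pvU (f : Nat → Int) : Nat → Int
  | 0 => 0
  | m + 1 => pvU f m + pvT f (m + 1)

-- the true (un-modded) sum of B's loop from start index s
def pvV (n : Int) : List Int → Int → Int
  | [], _ => 0
  | x :: t, s => x * (2 * s - n + 1) + pvV n t (s + 1)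

theorem pv_emod_add_left (a b M : Int) : (a % M + b) % M = (a + b) % M := by
  conv_lhs => rw [Int.add_emod]
  rw [Int.emod_emod_of_dvd _ dvd_rfl, ← Int.add_emod]

theorem pv_emod_add_right (a b M : Int) : (a + b % M) % M = (a + b) % M := by
  conv_lhs => rw [Int.add_emod]
  rw [Int.emod_emod_of_dvd _ dvd_rfl, ← Int.add_emod]

theorem pv_mod_eq (a : Int) : PySem.Int.mod a 1000000007 = a % 1000000007 :=
  PySem.Int.mod_eq_emod_of_pos (by norm_num)

-- A's loop over range(1, m+1) computes (pvT m % M, pvU m % M)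
theorem pvA_loop (arr : List Int) (m : Nat) :
    ((PySem.List.pyRange 1 ((m : Int) + 1) 1).foldl
      (fun (st : Int × Int) i =>
        (PySem.Int.mod
          (st.1 + i * (PySem.List.pyGetD arr i 0 - PySem.List.pyGetD arr (i - 1) 0)) 1000000007,
         PySem.Int.mod (st.2 + PySem.Int.mod
          (st.1 + i * (PySem.List.pyGetD arr i 0 - PySem.List.pyGetD arr (i - 1) 0)) 1000000007) 1000000007))
      ((0 : Int), (0 : Int)))
    = (pvT (fun k => arr.getD k 0) m % 1000000007, pvU (fun k => arr.getD k 0) m % 1000000007) := by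
  induction m with
  | zero =>
      rw [PySem.List.pyRange_one_eq_nil (by norm_num)]
      simp [pvT, pvU]
  | succ m ih =>
      have hsplit : PySem.List.pyRange 1 ((↑(m + 1) : Int) + 1) 1
          = PySem.List.pyRange 1 ((m : Int) + 1) 1 ++ [(m : Int) + 1] := by
        push_cast
        rw [PySem.List.pyRange_one_succ_right (by omega)]
      rw [hsplit, List.foldl_append, ih]
      simp only [List.foldl_cons, List.foldl_nil, pv_mod_eq]
      have h1 : ((m : Int) + 1) - 1 = (m : Int) := by ring
      have h2 : ((m : Int) + 1) = ((m + 1 : Nat) : Int) := by push_cast; ring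
      rw [h1]
      rw [h2]
      simp only [PySem.List.pyGetD_natCast]
      rw [pv_emod_add_left, pv_emod_add_right]
      refine congrArg₂ Prod.mk ?_ ?_
      · rw [pvT]; push_cast; ring_nf
      · rw [pv_emod_add_left, pvU, pvT]; push_cast; ring_nf

-- B's loop from any start s and reduced accumulator R % M computes (R + pvV n xs s) % M
theorem pvB_loop (n : Int) (xs : List Int) (s R : Int) :
    ((PySem.List.enumerate xs s).foldl
      (fun res p => PySem.Int.mod (res + p.2 * (2 * p.1 - n + 1)) 1000000007) (R % 1000000007))
    = (R + pvV n xs s) % 1000000007 := by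
  induction xs generalizing s R with
  | nil => simp [PySem.List.enumerate_nil, pvV]
  | cons x t ih =>
      simp only [PySem.List.enumerate_cons, List.foldl_cons]
      have hacc : PySem.Int.mod (R % 1000000007 + x * (2 * s - n + 1)) 1000000007
          = (R + x * (2 * s - n + 1)) % 1000000007 := by
        rw [pv_mod_eq, pv_emod_add_left]
      rw [hacc, ih, pvV]
      ring_nf

theorem pvT_closed (f : Nat → Int) (m : Nat) :
    pvT f m = (m : Int) * f m - ∑ i ∈ Finset.range m, f i := by
  induction m with
  | zero => simp [pvT]
  | succ m ih =>
      rw [pvT, ih, Finset.sum_range_succ]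
      push_cast; ring

theorem pvU_closed (f : Nat → Int) (m : Nat) :
    pvU f m = ∑ i ∈ Finset.range (m + 1), (2 * (i : Int) - m) * f i := by
  induction m with
  | zero => simp [pvU]
  | succ m ih =>
      rw [pvU, ih, pvT_closed,
          Finset.sum_range_succ (f := fun i => (2 * (i : Int) - ((m + 1 : Nat) : Int)) * f i)
            (n := m + 1)]
      rw [show (∑ i ∈ Finset.range (m + 1), (2 * (i : Int) - ((m + 1 : Nat) : Int)) * f i)
          = ∑ i ∈ Finset.range (m + 1), ((2 * (i : Int) - (m : Int)) * f i - f i) by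
        apply Finset.sum_congr rfl; intro i _; push_cast; ring]
      rw [Finset.sum_sub_distrib]
      push_cast; ring

theorem pvV_closed (n : Int) (xs : List Int) (s : Int) :
    pvV n xs s = ∑ k ∈ Finset.range xs.length, xs.getD k 0 * (2 * (s + (k : Int)) - n + 1) := by
  induction xs generalizing s with
  | nil => simp [pvV]
  | cons x t ih =>
      rw [pvV, ih (s + 1), List.length_cons, Finset.sum_range_succ']
      simp only [List.getD_cons_succ, List.getD_cons_zero]
      rw [Finset.sum_congr rfl (g := fun k => t.getD k 0 * (2 * (s + 1 + (k : Int)) - n + 1))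
        (by intro k _; push_cast; ring)]
      push_cast; ring

-- the central identity:  Σ_j Σ_{i≤j} i*(a_i - a_{i-1})  =  Σ_i a_i * (2i - n + 1)
theorem pvU_eq_pvV (arr : List Int) (m : Nat) (h : arr.length = m + 1) :
    pvU (fun k => arr.getD k 0) m = pvV ((m : Int) + 1) arr 0 := by
  rw [pvU_closed, pvV_closed, h]
  apply Finset.sum_congr rfl
  intro i _
  ring

-- ===== VERDICT (by name: the statement is the Claim_ definition above) =====
theorem sumDistance_spec : Claim_equal_sumDistance := by
  intro nums s d _ _
  unfold Spec_sumDistance sumDistance sumDistance_alt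
  simp only []
  generalize pvMoved nums s d = arr
  cases hlen : arr.length with
  | zero =>
      have h0 : arr = [] := List.length_eq_zero_iff.mp hlen
      subst h0
      norm_num [PySem.List.pyRange_one_eq_nil, PySem.List.enumerate_nil]
  | succ m =>
      push_cast
      rw [pvA_loop arr m]
      have hB := pvB_loop ((m : Int) + 1) arr 0 0
      rw [show (0 : Int) % 1000000007 = 0 from rfl, zero_add] at hB
      rw [hB, ← pvU_eq_pvV arr m hlen]
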